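-- pv_equiv track=rewrite | github.com/KasselFelix/Python-Programming_element | TME4/tme4Felix_Mechide.py | existe_couples_divise_rapide2
-- ===== SOURCE A (Python) =====
-- def existe_couples_divise_rapide2(n,p):
--     """int^2 -> bool
--     hyp: n<=p
--     renvoie True s'il existe couple d'entiers [i,j]
--     appartenant à l'intervalle [n;p], tel que i divise j
--     ou False sinon
--     """
--     #i:int
--     i=n
--
--     #j:int
--     j=n
--
--     #s:int
--     s=0
--
--     while i<p:
--         j=i+1
--         while j<=p:
--             if i!=0 and j%i==0:
--                 return True
--             j=j+1
--         i=i+1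
--
--     return False
-- ===== SOURCE B (Python) =====
-- def existe_couples_divise_rapide2(n, p):
--     """Closed form: a pair i<j in [n,p] with i|j exists iff
--     some negative i pairs with j=0 (n<0<=p), or some positive i has 2*i<=p."""
--     return (n < 0 and p >= 0) or (p >= 2 and max(n, 1) <= p // 2)
-- ===== Notes on version B (the rewrite author's own statement) =====
-- stated objective: simpler
-- what changed: Replaced the nested while-loop search over all pairs i<j in [n,p] with a one-line closed form: a dividing pair exists iff some negative i pairs with j=0 (n<0 and p>=0) or some positive i has its double inside the range (p>=2 and max(n,1) <= p//2).
import Mathlib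
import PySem

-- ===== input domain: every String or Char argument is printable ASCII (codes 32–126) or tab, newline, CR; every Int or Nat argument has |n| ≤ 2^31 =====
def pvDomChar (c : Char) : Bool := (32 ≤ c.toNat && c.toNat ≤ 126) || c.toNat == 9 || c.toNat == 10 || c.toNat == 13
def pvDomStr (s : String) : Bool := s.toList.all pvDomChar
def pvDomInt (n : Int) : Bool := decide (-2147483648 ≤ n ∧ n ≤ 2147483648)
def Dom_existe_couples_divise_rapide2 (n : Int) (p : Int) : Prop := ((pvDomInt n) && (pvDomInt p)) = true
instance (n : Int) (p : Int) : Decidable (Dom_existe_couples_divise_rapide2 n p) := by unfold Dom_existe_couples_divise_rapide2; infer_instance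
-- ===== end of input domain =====

-- B replaces A's nested pair scan with a one-line closed-form condition (objective: simpler).

-- ===== PORT A =====
-- inner while loop: j from its start up to p, returns true on the first j with i≠0 and j%i==0
def pvInner (i : Int) (j : Int) (p : Int) : Bool :=
  if j ≤ p then
    if i ≠ 0 ∧ PySem.Int.mod j i = 0 then true
    else pvInner i (j + 1) p
  else false
termination_by (p + 1 - j).toNat
decreasing_by omega

-- outer while loop: i from its start while i < p
def pvOuter (i : Int) (p : Int) : Bool :=
  if i < p then
    if pvInner i (i + 1) p then true
    else pvOuter (i + 1) p
  else false
termination_by (p - i).toNat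
decreasing_by omega

def existe_couples_divise_rapide2 (n : Int) (p : Int) : Bool :=
  pvOuter n p

-- ===== PORT B =====
def existe_couples_divise_rapide2_alt (n : Int) (p : Int) : Bool :=
  (n < 0 && 0 ≤ p) || (2 ≤ p && max n 1 ≤ PySem.Int.floordiv p 2)

-- ===== PRECONDITION & SPEC =====
def Spec_existe_couples_divise_rapide2 (n : Int) (p : Int) (out : Bool) : Prop := out = existe_couples_divise_rapide2_alt n p
instance (n : Int) (p : Int) (out : Bool) : Decidable (Spec_existe_couples_divise_rapide2 n p out) := by unfold Spec_existe_couples_divise_rapide2; infer_instance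

-- ===== CLAIM (what is proved, stated in full; the proofs are below) =====
def Claim_equal_existe_couples_divise_rapide2 : Prop := ∀ (n : Int) (p : Int), Dom_existe_couples_divise_rapide2 n p → Spec_existe_couples_divise_rapide2 n p (existe_couples_divise_rapide2 n p)

-- ===== LEMMAS AND PROOFS =====

theorem pvInner_iff (i j p : Int) :
    pvInner i j p = true ↔ ∃ k, j ≤ k ∧ k ≤ p ∧ i ≠ 0 ∧ i ∣ k := by
  fun_induction pvInner i j p with
  | case1 j hle hdiv =>
      simp only [true_iff]
      exact ⟨j, le_refl _, hle, hdiv.1, (PySem.Int.mod_eq_zero_iff_dvd j i).mp hdiv.2⟩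
  | case2 j hle hdiv ih =>
      rw [ih]
      constructor
      · rintro ⟨k, hk1, hk2, hk3, hk4⟩; exact ⟨k, by omega, hk2, hk3, hk4⟩
      · rintro ⟨k, hk1, hk2, hk3, hk4⟩
        refine ⟨k, ?_, hk2, hk3, hk4⟩
        rcases eq_or_lt_of_le hk1 with h | h
        · exfalso; apply hdiv
          constructor
          · exact hk3
          · rw [PySem.Int.mod_eq_zero_iff_dvd]; exact h ▸ hk4
        · omega
  | case3 j h =>
      simp only [Bool.false_eq_true, false_iff]
      rintro ⟨k, hk1, hk2, _, _⟩; omega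

theorem pvOuter_iff (i p : Int) :
    pvOuter i p = true ↔ ∃ a k, i ≤ a ∧ a < p ∧ a < k ∧ k ≤ p ∧ a ≠ 0 ∧ a ∣ k := by
  fun_induction pvOuter i p with
  | case1 i hlt hin =>
      simp only [true_iff]
      obtain ⟨k, hk1, hk2, hk3, hk4⟩ := (pvInner_iff i (i + 1) p).mp hin
      exact ⟨i, k, le_refl _, hlt, by omega, hk2, hk3, hk4⟩
  | case2 i hlt hin ih =>
      rw [ih]
      constructor
      · rintro ⟨a, k, h1, h2, h3, h4, h5, h6⟩; exact ⟨a, k, by omega, h2, h3, h4, h5, h6⟩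
      · rintro ⟨a, k, h1, h2, h3, h4, h5, h6⟩
        refine ⟨a, k, ?_, h2, h3, h4, h5, h6⟩
        rcases eq_or_lt_of_le h1 with h | h
        · exfalso
          rw [Bool.not_eq_true] at hin
          have := (pvInner_iff i (i + 1) p)
          rw [hin] at this
          exact absurd (this.symm.mp (h ▸ ⟨k, by omega, h4, h5, h6⟩)) (by simp)
        · omega
  | case3 i h =>
      simp only [Bool.false_eq_true, false_iff]
      rintro ⟨a, k, h1, h2, _⟩; omega

-- any multiple of a negative a strictly above a is ≥ 0
theorem dvd_neg_above (a k : Int) (_ha : a < 0) (hd : a ∣ k) (hk : a < k) : 0 ≤ k := by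
  by_contra h
  push Not at h
  have h1 : (-a) ∣ (-k) := (dvd_neg.mpr hd).neg_left
  have := Int.le_of_dvd (by omega) h1
  omega

-- any multiple of a positive a strictly above a is ≥ 2a
theorem dvd_pos_above (a k : Int) (_ha : 0 < a) (hd : a ∣ k) (hk : a < k) : 2 * a ≤ k := by
  have h1 : a ∣ (k - a) := (dvd_sub hd (dvd_refl a))
  have := Int.le_of_dvd (by omega) h1
  omega

theorem exists_iff (n p : Int) :
    (∃ a k, n ≤ a ∧ a < p ∧ a < k ∧ k ≤ p ∧ a ≠ 0 ∧ a ∣ k) ↔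
    ((n < 0 ∧ 0 ≤ p) ∨ (2 ≤ p ∧ max n 1 ≤ PySem.Int.floordiv p 2)) := by
  rw [PySem.Int.le_floordiv_iff_mul_le (by omega : (0:Int) < 2)]
  constructor
  · rintro ⟨a, k, h1, h2, h3, h4, h5, h6⟩
    rcases lt_trichotomy a 0 with ha | ha | ha
    · left
      have := dvd_neg_above a k ha h6 h3
      constructor <;> omega
    · omega
    · right
      have := dvd_pos_above a k ha h6 h3
      constructor
      · omega
      · have : max n 1 ≤ a := by omega
        nlinarith [le_max_left n 1, le_max_right n 1]
  · rintro (⟨h1, h2⟩ | ⟨h1, h2⟩)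
    · exact ⟨n, 0, le_refl _, by omega, by omega, by omega, by omega, dvd_zero n⟩
    · refine ⟨max n 1, 2 * max n 1, le_max_left _ _, ?_, ?_, by omega, ?_, dvd_mul_left (max n 1) 2⟩
      · have := le_max_right n 1; omega
      · have := le_max_right n 1; omega
      · have := le_max_right n 1; omega

-- ===== VERDICT (by name: the statement is the Claim_ definition above) =====
theorem existe_couples_divise_rapide2_spec : Claim_equal_existe_couples_divise_rapide2 := by
  intro n p _
  unfold Spec_existe_couples_divise_rapide2 existe_couples_divise_rapide2
  have halt : existe_couples_divise_rapide2_alt n p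
      = decide ((n < 0 ∧ 0 ≤ p) ∨ (2 ≤ p ∧ max n 1 ≤ PySem.Int.floordiv p 2)) := by
    simp [existe_couples_divise_rapide2_alt]
  rw [halt]
  rcases Decidable.em ((n < 0 ∧ 0 ≤ p) ∨ (2 ≤ p ∧ max n 1 ≤ PySem.Int.floordiv p 2)) with h | h
  · rw [decide_eq_true h]
    exact (pvOuter_iff n p).mpr ((exists_iff n p).mpr h)
  · rw [decide_eq_false h, ← Bool.not_eq_true, pvOuter_iff, exists_iff]
    exact h
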